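-- pv_equiv track=rewrite | github.com/freemanatee11/Wizardscape | wizardscape.py | place_everything
-- ===== SOURCE A (Python) =====
-- def place_everything(to_place, intersections):
--     words_to_place = []
--     grid_bounds = (15, 25)  # Grid dimensions (rows, cols)
--
--     for idx, (word_split, intersection) in enumerate(zip(to_place, intersections)):
--         orientation = "horizontal" if idx % 2 == 0 else "vertical"
--         placed_word = place(word_split, intersection, orientation)
--
--         # Check for out of bounds placement
--         is_valid = True
--         for _, (y, x) in placed_word:
--             if (y < 0 or y >= grid_bounds[0] or
--                 x < 0 or x >= grid_bounds[1]):
--                 is_valid = False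
--                 break
--
--         # Check for conflicts with existing words
--         if is_valid:
--             for placed in words_to_place:
--                 for new_letter, new_pos in placed_word:
--                     for old_letter, old_pos in placed:
--                         if new_pos == old_pos and new_letter != old_letter:
--                             is_valid = False
--                             break
--                     if not is_valid:
--                         break
--                 if not is_valid:
--                     break
--
--         # Only add valid placements
--         if is_valid:
--             words_to_place.append(placed_word)
--
--     return words_to_place
--
-- def place(splitted, intersection, orientation):
--     less, great = splitted
--     inter, (y, x) = intersection
--     if orientation == "horizontal":
--         paired_up = []
--         left = len(less)
--         right = len(great)
--         for letter, j in zip(less, list(range(x - left, x))):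
--             paired_up.append((letter, (y, j)))
--         for letter, j in zip(great, list(range(x + 1, x + right + 1))):
--             paired_up.append((letter, (y, j)))
--     else:
--         paired_up = []
--         up = len(less)
--         down = len(great)
--         for letter, i in zip(less, list(range(y - up, y))):
--             paired_up.append((letter, (i, x)))
--         for letter, i in zip(great, list(range(y + 1, y + down + 1))):
--             paired_up.append((letter, (i, x)))
--     return paired_up
-- ===== SOURCE B (Python) =====
-- # B: one forward pass with a dict position->letter; each word's cells are computed by
-- # index arithmetic (enumerate) and validated by a single dict lookup per letter,
-- # instead of A's nested rescans of every previously placed word.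
-- def place_everything(to_place, intersections):
--     occupied = {}
--     out = []
--     horiz = True
--     for word_split, (_, center) in zip(to_place, intersections):
--         word = positions(word_split, center, horiz)
--         horiz = not horiz
--         if all(0 <= y < 15 and 0 <= x < 25 and occupied.get((y, x), ch) == ch
--                for ch, (y, x) in word):
--             for ch, pos in word:
--                 occupied[pos] = ch
--             out.append(word)
--     return out
--
-- def positions(splitted, center, horiz):
--     less, great = splitted
--     y, x = center
--     c = x if horiz else y
--     coords = [(ch, c - len(less) + i) for i, ch in enumerate(less)]
--     coords += [(ch, c + 1 + i) for i, ch in enumerate(great)]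
--     if horiz:
--         return [(ch, (y, j)) for ch, j in coords]
--     return [(ch, (i, x)) for ch, i in coords]
-- ===== Notes on version B (the rewrite author's own statement) =====
-- stated objective: alternative
-- what changed: Replaces A's nested rescans of every previously placed word per new letter with one dict mapping occupied position -> letter (one lookup per letter), and computes each word's cells by index arithmetic over enumerate instead of zipping with materialised range lists.
import Mathlib
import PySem

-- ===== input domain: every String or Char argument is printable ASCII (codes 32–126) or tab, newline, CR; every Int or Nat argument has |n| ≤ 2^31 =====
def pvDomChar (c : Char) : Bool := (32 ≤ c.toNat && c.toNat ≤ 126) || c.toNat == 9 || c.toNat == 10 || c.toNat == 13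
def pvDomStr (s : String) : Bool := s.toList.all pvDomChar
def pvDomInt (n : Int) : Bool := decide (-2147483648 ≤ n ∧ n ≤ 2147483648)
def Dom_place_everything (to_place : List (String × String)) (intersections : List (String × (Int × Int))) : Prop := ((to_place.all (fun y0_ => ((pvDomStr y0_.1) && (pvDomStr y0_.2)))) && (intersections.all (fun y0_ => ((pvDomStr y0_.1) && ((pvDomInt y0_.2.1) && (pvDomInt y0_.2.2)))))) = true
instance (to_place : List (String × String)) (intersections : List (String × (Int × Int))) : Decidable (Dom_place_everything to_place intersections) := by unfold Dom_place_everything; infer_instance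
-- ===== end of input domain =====

-- B replaces A's nested rescans of all previously placed words by one dict position→letter
-- (one lookup per letter) and computes each word's cells by index arithmetic; equality proved on all inputs.

-- ===== PORT A =====
-- A's helper `place`: zips the letters with materialised range lists
def place (splitted : String × String) (intersection : String × (Int × Int)) (orientation : String) : List (String × (Int × Int)) :=
  let less := splitted.1
  let great := splitted.2
  let y := intersection.2.1
  let x := intersection.2.2
  if orientation == "horizontal" then
    (less.toList.zip (PySem.List.pyRange (x - PySem.Str.len less) x 1)).map (fun p => (String.ofList [p.1], (y, p.2)))
    ++ (great.toList.zip (PySem.List.pyRange (x + 1) (x + PySem.Str.len great + 1) 1)).map (fun p => (String.ofList [p.1], (y, p.2)))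
  else
    (less.toList.zip (PySem.List.pyRange (y - PySem.Str.len less) y 1)).map (fun p => (String.ofList [p.1], (p.2, x)))
    ++ (great.toList.zip (PySem.List.pyRange (y + 1) (y + PySem.Str.len great + 1) 1)).map (fun p => (String.ofList [p.1], (p.2, x)))

-- A's loop body: bounds check, then nested scans over all previously placed words
def stepA (words_to_place : List (List (String × (Int × Int))))
    (ip : Int × ((String × String) × (String × (Int × Int)))) : List (List (String × (Int × Int))) :=
  let orientation := if PySem.Int.mod ip.1 2 == 0 then "horizontal" else "vertical"
  let placed_word := place ip.2.1 ip.2.2 orientation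
  let is_valid :=
    placed_word.all (fun lp => decide (¬(lp.2.1 < 0 ∨ 15 ≤ lp.2.1 ∨ lp.2.2 < 0 ∨ 25 ≤ lp.2.2)))
    && words_to_place.all (fun placed =>
         placed_word.all (fun np => placed.all (fun op => decide (¬(np.2 = op.2 ∧ np.1 ≠ op.1)))))
  if is_valid then words_to_place ++ [placed_word] else words_to_place

def place_everything (to_place : List (String × String)) (intersections : List (String × (Int × Int))) : List (List (String × (Int × Int))) :=
  (PySem.List.enumerate (to_place.zip intersections) 0).foldl stepA []

-- ===== PORT B =====
-- B's helper `positions`: cell coordinates by index arithmetic over enumerate (no range lists)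
def positionsB (splitted : String × String) (center : Int × Int) (horiz : Bool) : List (String × (Int × Int)) :=
  let less := splitted.1.toList
  let great := splitted.2.toList
  let c : Int := if horiz then center.2 else center.1
  let coords := less.zipIdx.map (fun p => (p.1, c - (less.length : Int) + (p.2 : Int)))
    ++ great.zipIdx.map (fun p => (p.1, c + 1 + (p.2 : Int)))
  if horiz then coords.map (fun q => (String.ofList [q.1], (center.1, q.2)))
  else coords.map (fun q => (String.ofList [q.1], (q.2, center.2)))

-- B's per-letter check: in bounds and the dict holds no different letter there
def fitsB (word : List (String × (Int × Int))) (occ : PySem.Dict (Int × Int) String) : Bool :=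
  word.all (fun lp => decide (0 ≤ lp.2.1 ∧ lp.2.1 < 15 ∧ 0 ≤ lp.2.2 ∧ lp.2.2 < 25)
    && (occ.getD lp.2 lp.1 == lp.1))

-- B's loop as structural recursion: carry the orientation flag and the dict, cons accepted words
def goB : List ((String × String) × (String × (Int × Int))) → Bool → PySem.Dict (Int × Int) String → List (List (String × (Int × Int)))
  | [], _, _ => []
  | p :: rest, horiz, occ =>
    let word := positionsB p.1 p.2.2 horiz
    if fitsB word occ then
      word :: goB rest (!horiz) (word.foldl (fun o lp => o.insert lp.2 lp.1) occ)
    else goB rest (!horiz) occ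

def place_everything_alt (to_place : List (String × String)) (intersections : List (String × (Int × Int))) : List (List (String × (Int × Int))) :=
  goB (to_place.zip intersections) true PySem.Dict.empty

-- ===== PRECONDITION & SPEC =====
def Spec_place_everything (to_place : List (String × String)) (intersections : List (String × (Int × Int))) (out : List (List (String × (Int × Int)))) : Prop := out = place_everything_alt to_place intersections
instance (to_place : List (String × String)) (intersections : List (String × (Int × Int))) (out : List (List (String × (Int × Int)))) : Decidable (Spec_place_everything to_place intersections out) := by unfold Spec_place_everything; infer_instance

-- ===== CLAIM (what is proved, stated in full; the proofs are below) =====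
def Claim_equal_place_everything : Prop := ∀ (to_place : List (String × String)) (intersections : List (String × (Int × Int))), Dom_place_everything to_place intersections → Spec_place_everything to_place intersections (place_everything to_place intersections)

-- ===== LEMMAS AND PROOFS =====

-- zip-with-a-range (A's pairing) is enumerate-with-offset (B's pairing)
lemma zipIdx_eq_zip_pyRange (cs : List Char) (a : Int) (n : Nat) :
    (cs.zipIdx n).map (fun p => (p.1, a + (p.2 : Int))) = cs.zip (PySem.List.pyRange (a + n) (a + n + cs.length) 1) := by
  induction cs generalizing n with
  | nil => simp [PySem.List.pyRange_one_eq_nil]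
  | cons c t ih =>
    rw [List.zipIdx_cons, PySem.List.pyRange_one_cons (by push_cast [List.length_cons]; omega)]
    simp only [List.map_cons, List.zip_cons_cons, List.length_cons]
    refine congrArg₂ _ rfl ?_
    rw [ih (n+1), show a + ↑(n+1) = a + ↑n + 1 by push_cast; ring,
        show a + ↑n + 1 + (t.length:Int) = a + ↑n + ↑(t.length + 1) by push_cast; ring]

lemma zip_left (cs : List Char) (c : Int) :
    cs.zipIdx.map (fun p => (p.1, c - (cs.length:Int) + (p.2:Int))) = cs.zip (PySem.List.pyRange (c - cs.length) c 1) := by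
  rw [show cs.zipIdx = cs.zipIdx 0 from rfl, zipIdx_eq_zip_pyRange cs (c - cs.length) 0,
      show c - (cs.length:Int) + (0:Nat) = c - cs.length by push_cast; ring]
  rw [show c - (cs.length:Int) + (cs.length:Int) = c by ring]

lemma zip_right (cs : List Char) (c : Int) :
    cs.zipIdx.map (fun p => (p.1, c + 1 + (p.2:Int))) = cs.zip (PySem.List.pyRange (c + 1) (c + cs.length + 1) 1) := by
  rw [show cs.zipIdx = cs.zipIdx 0 from rfl, zipIdx_eq_zip_pyRange cs (c + 1) 0,
      show c + 1 + ((0:Nat):Int) = c + 1 by push_cast; ring]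
  rw [show c + 1 + (cs.length:Int) = c + cs.length + 1 by ring]

-- B's `positions` produces exactly A's `place`
lemma positionsB_eq (sp : String × String) (inter : String × (Int × Int)) (h : Bool) :
    positionsB sp inter.2 h = place sp inter (if h then "horizontal" else "vertical") := by
  cases h with
  | true =>
    simp only [positionsB, place, PySem.Str.len_eq, if_true]
    rw [show (("horizontal" == "horizontal") = true) from rfl]
    simp only [if_true, List.map_append]
    rw [zip_left, zip_right]
  | false =>
    simp only [positionsB, place, PySem.Str.len_eq]
    rw [show (if false = true then "horizontal" else "vertical") = "vertical" from rfl,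
        show (("vertical" == "horizontal") = false) from rfl]
    simp only [Bool.false_eq_true, if_false, List.map_append]
    rw [zip_left, zip_right]

-- the dict holds exactly the letters of the already-placed words
def PlacedInv (placed : List (List (String × (Int × Int)))) (occ : PySem.Dict (Int × Int) String) : Prop :=
  ∀ (l : String) (p : Int × Int), occ.get? p = some l ↔ ∃ w ∈ placed, (l, p) ∈ w

lemma zipmap_pos (cs : List Char) (rng : List Int) (g : Int → Int × Int)
    (hlen : rng.length = cs.length) :
    ((cs.zip rng).map (fun p => (String.ofList [p.1], g p.2))).map (fun lp => lp.2) = rng.map g := by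
  rw [List.map_map,
      show ((fun lp : String × Int × Int => lp.2) ∘ fun p : Char × Int => (String.ofList [p.1], g p.2))
        = g ∘ Prod.snd from rfl,
      ← List.map_map, List.map_snd_zip hlen.le]

lemma nodup_two_ranges (a1 b1 a2 b2 : Int) (g : Int → Int × Int)
    (hinj : Function.Injective g) (hd : b1 ≤ a2) :
    ((PySem.List.pyRange a1 b1 1).map g ++ (PySem.List.pyRange a2 b2 1).map g).Nodup := by
  refine List.Nodup.append ((PySem.List.nodup_pyRange_one a1 b1).map hinj)
    ((PySem.List.nodup_pyRange_one a2 b2).map hinj) ?_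
  intro p h1 h2
  obtain ⟨j1, hj1, rfl⟩ := List.mem_map.mp h1
  obtain ⟨j2, hj2, hj⟩ := List.mem_map.mp h2
  have e := hinj hj
  rw [PySem.List.mem_pyRange_one] at hj1 hj2
  omega

lemma nodup_place_pos (sp : String × String) (inter : String × (Int × Int)) (o : String) :
    ((place sp inter o).map (fun lp => lp.2)).Nodup := by
  unfold place
  split
  · rw [List.map_append,
        zipmap_pos sp.1.toList _ (fun j => (inter.2.1, j))
          (by simp only [PySem.List.length_pyRange_one, PySem.Str.len_eq]; omega),
        zipmap_pos sp.2.toList _ (fun j => (inter.2.1, j))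
          (by simp only [PySem.List.length_pyRange_one, PySem.Str.len_eq]; omega)]
    exact nodup_two_ranges _ _ _ _ _ (fun a b h => by simpa using h) (by omega)
  · rw [List.map_append,
        zipmap_pos sp.1.toList _ (fun j => (j, inter.2.2))
          (by simp only [PySem.List.length_pyRange_one, PySem.Str.len_eq]; omega),
        zipmap_pos sp.2.toList _ (fun j => (j, inter.2.2))
          (by simp only [PySem.List.length_pyRange_one, PySem.Str.len_eq]; omega)]
    exact nodup_two_ranges _ _ _ _ _ (fun a b h => by simpa using h) (by omega)

lemma insertAll_get? (w : List (String × (Int × Int))) (d : PySem.Dict (Int × Int) String)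
    (h : (w.map (fun lp => lp.2)).Nodup) (p : Int × Int) :
    (w.foldl (fun occ lp => occ.insert lp.2 lp.1) d).get? p =
      match w.find? (fun lp => lp.2 == p) with
      | some lp => some lp.1
      | none => d.get? p := by
  induction w generalizing d with
  | nil => rfl
  | cons a t ih =>
    simp only [List.map_cons, List.nodup_cons] at h
    simp only [List.foldl_cons]
    rw [ih _ h.2]
    by_cases hp : a.2 = p
    · have hnone : t.find? (fun lp => lp.2 == p) = none := by
        rw [List.find?_eq_none]
        intro x hx
        simp only [beq_iff_eq]
        intro hxp
        exact h.1 (by rw [hp, ← hxp]; exact List.mem_map_of_mem hx)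
      rw [List.find?_cons_of_pos (by simpa using hp), hnone, hp,
          PySem.Dict.get?_insert_self]
    · by_cases hf : (t.find? (fun lp => lp.2 == p)).isSome
      · obtain ⟨lp, hlp⟩ := Option.isSome_iff_exists.mp hf
        rw [hlp, List.find?_cons_of_neg (by simpa using hp), hlp]
      · rw [Option.not_isSome_iff_eq_none] at hf
        rw [hf, List.find?_cons_of_neg (by simpa using hp), hf,
            PySem.Dict.get?_insert_of_ne _ _ (fun e => hp e.symm)]

lemma mem_iff_find (w : List (String × (Int × Int))) (h : (w.map (fun lp => lp.2)).Nodup)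
    (l : String) (p : Int × Int) :
    (l, p) ∈ w ↔ w.find? (fun lp => lp.2 == p) = some (l, p) := by
  constructor
  · intro hm
    induction w with
    | nil => simp at hm
    | cons a t ih =>
      simp only [List.map_cons, List.nodup_cons] at h
      rcases List.mem_cons.mp hm with rfl | hmt
      · exact List.find?_cons_of_pos (by simp)
      · have hne : a.2 ≠ p := fun e => h.1 (by rw [e]; exact List.mem_map_of_mem hmt)
        rw [List.find?_cons_of_neg (by simpa using hne)]
        exact ih h.2 hmt
  · exact List.mem_of_find?_eq_some

lemma inv_step (placed : List (List (String × (Int × Int)))) (occ : PySem.Dict (Int × Int) String)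
    (w : List (String × (Int × Int))) (hInv : PlacedInv placed occ)
    (hnd : (w.map (fun lp => lp.2)).Nodup)
    (hok : ∀ lp ∈ w, ∀ l, occ.get? lp.2 = some l → l = lp.1) :
    PlacedInv (placed ++ [w]) (w.foldl (fun occ lp => occ.insert lp.2 lp.1) occ) := by
  intro l p
  rw [insertAll_get? w occ hnd p]
  constructor
  · intro hget
    cases hfind : w.find? (fun lp => lp.2 == p) with
    | some lp =>
      rw [hfind] at hget
      have hmem := List.mem_of_find?_eq_some hfind
      have hp2 : lp.2 = p := by simpa using List.find?_some hfind
      refine ⟨w, by simp, ?_⟩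
      have : lp = (l, p) := by
        cases lp; simp at hget hp2; simp [hget, hp2]
      exact this ▸ hmem
    | none =>
      rw [hfind] at hget
      obtain ⟨pw, hpw, hlp⟩ := (hInv l p).mp hget
      exact ⟨pw, by simp [hpw], hlp⟩
  · rintro ⟨pw, hpw, hlp⟩
    rcases List.mem_append.mp hpw with hpl | hw
    · have hget : occ.get? p = some l := (hInv l p).mpr ⟨pw, hpl, hlp⟩
      cases hfind : w.find? (fun lp => lp.2 == p) with
      | some lp =>
        have hmem := List.mem_of_find?_eq_some hfind
        have hp2 : lp.2 = p := by simpa using List.find?_some hfind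
        have := hok lp hmem l (by rw [hp2]; exact hget)
        simp [this]
      | none => exact hget
    · have hw' : (l, p) ∈ w := by
        rw [← List.mem_singleton.mp hw]; exact hlp
      rw [(mem_iff_find w hnd l p).mp hw']

-- B's per-letter dict test says exactly "no already-placed word holds a different letter here"
lemma dict_iff (placed : List (List (String × (Int × Int)))) (occ : PySem.Dict (Int × Int) String)
    (hInv : PlacedInv placed occ) (np : String × (Int × Int)) :
    ((occ.getD np.2 np.1 == np.1) = true) ↔
      ∀ pw ∈ placed, ∀ op ∈ pw, op.2 = np.2 → op.1 = np.1 := by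
  have hg : occ.getD np.2 np.1 = (occ.get? np.2).getD np.1 := by
    simp [PySem.Dict.getD, PySem.Dict.get?]
  cases hocc : occ.get? np.2 with
  | none =>
    rw [hg, hocc]
    constructor
    · intro _ pw hpw op hop h2
      have hm : (op.1, np.2) ∈ pw := by rw [← h2]; simpa using hop
      have := (hInv op.1 np.2).mpr ⟨pw, hpw, hm⟩
      rw [hocc] at this
      cases this
    · intro _; simp
  | some prev =>
    rw [hg, hocc]
    simp only [Option.getD_some, beq_iff_eq]
    constructor
    · intro h pw hpw op hop h2
      have hm : (op.1, np.2) ∈ pw := by rw [← h2]; simpa using hop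
      have hopget := (hInv op.1 np.2).mpr ⟨pw, hpw, hm⟩
      rw [hocc] at hopget
      rw [← Option.some.inj hopget]
      exact h
    · intro h
      obtain ⟨pw, hpw, hmem⟩ := (hInv prev np.2).mp hocc
      exact h pw hpw (prev, np.2) hmem rfl

-- A's validity bool equals B's validity bool
lemma valid_eq (placed : List (List (String × (Int × Int)))) (occ : PySem.Dict (Int × Int) String)
    (hInv : PlacedInv placed occ) (w : List (String × (Int × Int))) :
    (w.all (fun lp => decide (¬(lp.2.1 < 0 ∨ 15 ≤ lp.2.1 ∨ lp.2.2 < 0 ∨ 25 ≤ lp.2.2)))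
      && placed.all (fun pl => w.all (fun np => pl.all (fun op => decide (¬(np.2 = op.2 ∧ np.1 ≠ op.1))))))
    = fitsB w occ := by
  apply Bool.coe_iff_coe.mp
  simp only [fitsB, List.all_eq_true, Bool.and_eq_true, decide_eq_true_eq]
  constructor
  · rintro ⟨hb, hc⟩ lp hlp
    refine ⟨by have := hb lp hlp; omega, (dict_iff placed occ hInv lp).mpr ?_⟩
    intro pw hpw op hop h2
    by_contra hne
    exact (hc pw hpw lp hlp op hop) ⟨h2.symm, fun e => hne e.symm⟩
  · intro hB
    refine ⟨fun lp hlp => by have := (hB lp hlp).1; omega, ?_⟩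
    intro pw hpw np hnp op hop
    have h2 := (dict_iff placed occ hInv np).mp (hB np hnp).2 pw hpw op hop
    rintro ⟨he, hne⟩
    exact hne ((h2 he.symm).symm)

-- when B accepts a word, every occupied position it touches already holds the same letter
lemma hok_of_ok (occ : PySem.Dict (Int × Int) String) (w : List (String × (Int × Int)))
    (hall : fitsB w occ = true) :
    ∀ lp ∈ w, ∀ l, occ.get? lp.2 = some l → l = lp.1 := by
  intro lp hlp l hget
  have hx := List.all_eq_true.mp hall lp hlp
  rw [Bool.and_eq_true] at hx
  have h2 := hx.2
  have hg : occ.getD lp.2 lp.1 = (occ.get? lp.2).getD lp.1 := by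
    simp [PySem.Dict.getD, PySem.Dict.get?]
  rw [hg, hget] at h2
  simpa using h2

lemma mod_toggle (n : Int) : (PySem.Int.mod (n+1) 2 == 0) = !(PySem.Int.mod n 2 == 0) := by
  have e1 : PySem.Int.mod n 2 = n % 2 := PySem.Int.mod_eq_emod_of_pos (by omega)
  have e2 : PySem.Int.mod (n+1) 2 = (n+1) % 2 := PySem.Int.mod_eq_emod_of_pos (by omega)
  rcases PySem.Int.mod_two_eq n with h | h <;> rcases PySem.Int.mod_two_eq (n+1) with h2 | h2 <;>
      rw [h, h2] <;> simp <;> omega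

-- A's enumerate-fold from any state equals that state followed by B's recursion
lemma loop_eq (L : List ((String × String) × (String × (Int × Int)))) (n : Int)
    (acc : List (List (String × (Int × Int)))) (occ : PySem.Dict (Int × Int) String)
    (hInv : PlacedInv acc occ) :
    (PySem.List.enumerate L n).foldl stepA acc = acc ++ goB L (PySem.Int.mod n 2 == 0) occ := by
  induction L generalizing n acc occ with
  | nil => simp [PySem.List.enumerate_nil, goB]
  | cons p t ih =>
    rw [PySem.List.enumerate_cons, List.foldl_cons]
    have hw : place p.1 p.2 (if PySem.Int.mod n 2 == 0 then "horizontal" else "vertical")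
        = positionsB p.1 p.2.2 (PySem.Int.mod n 2 == 0) := (positionsB_eq p.1 p.2 _).symm
    show (PySem.List.enumerate t (n+1)).foldl stepA (stepA acc (n, p)) = _
    simp only [stepA, hw, valid_eq acc occ hInv, goB]
    by_cases hfit : fitsB (positionsB p.1 p.2.2 (PySem.Int.mod n 2 == 0)) occ = true
    · rw [if_pos hfit, if_pos hfit]
      have hnd : ((positionsB p.1 p.2.2 (PySem.Int.mod n 2 == 0)).map (fun lp => lp.2)).Nodup := by
        rw [positionsB_eq p.1 p.2]; exact nodup_place_pos _ _ _
      rw [ih (n+1) _ _ (inv_step acc occ _ hInv hnd (hok_of_ok occ _ hfit)), mod_toggle]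
      simp
    · rw [if_neg hfit, if_neg hfit, ih (n+1) _ _ hInv, mod_toggle]

-- ===== VERDICT (by name: the statement is the Claim_ definition above) =====
theorem place_everything_spec : Claim_equal_place_everything := by
  intro to_place intersections _
  unfold Spec_place_everything place_everything place_everything_alt
  rw [loop_eq _ 0 [] PySem.Dict.empty (by intro l p; simp [PySem.Dict.get?_empty])]
  rfl
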